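-- pv_equiv track=rewrite | github.com/Nghia03092004/nghia03092004.github.io | project_euler_unified/problem_486/solution.py | mat_vec_mod
-- ===== SOURCE A (Python) =====
-- def mat_vec_mod(A, v, mod):
--     n = len(v)
--     result = [0]*n
--     for i in range(n):
--         s = 0
--         row = A[i]
--         for j in range(n):
--             s += row[j] * v[j]
--         result[i] = s % mod
--     return result
-- ===== SOURCE B (Python) =====
-- def mat_vec_mod(A, v, mod):
--     # Divide-and-conquer over column ranges: recursively combine partial-sum
--     # vectors for halves of the columns, then take the modulo in a final pass.
--     n = len(v)
--     if n == 0: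
--         return []
--
--     def combine(lo, hi):
--         # partial result vector over columns [lo, hi): sum_{lo<=j<hi} A[i][j]*v[j]
--         if hi - lo == 1:
--             vj = v[lo]
--             return [A[i][lo] * vj for i in range(n)]
--         mid = (lo + hi) // 2
--         left = combine(lo, mid)
--         right = combine(mid, hi)
--         return [x + y for x, y in zip(left, right)]
--
--     return [s % mod for s in combine(0, n)]
-- ===== Notes on version B (the rewrite author's own statement) =====
-- stated objective: alternative
-- what changed: Row-by-row dot products replaced by a recursive divide-and-conquer over column ranges: partial-sum vectors for the two halves of the columns are computed recursively and combined elementwise with zip, with the modulo applied in a separate final pass.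
import Mathlib
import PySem

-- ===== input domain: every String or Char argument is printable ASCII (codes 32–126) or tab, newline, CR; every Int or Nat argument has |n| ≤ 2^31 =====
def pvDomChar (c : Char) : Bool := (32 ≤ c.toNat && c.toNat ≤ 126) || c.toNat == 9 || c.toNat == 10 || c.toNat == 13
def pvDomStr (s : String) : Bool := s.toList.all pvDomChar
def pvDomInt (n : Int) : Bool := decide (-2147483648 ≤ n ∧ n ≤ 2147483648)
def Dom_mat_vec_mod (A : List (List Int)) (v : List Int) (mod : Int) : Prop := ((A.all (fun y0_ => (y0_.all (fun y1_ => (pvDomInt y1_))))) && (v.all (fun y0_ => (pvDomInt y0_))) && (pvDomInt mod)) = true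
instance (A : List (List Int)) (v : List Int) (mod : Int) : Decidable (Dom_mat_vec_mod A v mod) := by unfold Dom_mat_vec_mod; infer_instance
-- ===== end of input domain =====

-- B replaces A's iterative row-by-row dot products with a recursive divide-and-conquer
-- over column ranges (halves combined elementwise by zip, modulo in a final pass);
-- alternative decomposition of the same O(n^2) computation.


-- ===== PORT A =====
def mat_vec_mod (A : List (List Int)) (v : List Int) (mod : Int) : List Int :=
  let n : Int := v.length
  let result : List Int := List.replicate v.length 0
  (PySem.List.pyRange 0 n 1).foldl (fun result i =>
    let s : Int := 0
    let row := PySem.List.pyGetD A i []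
    let s := (PySem.List.pyRange 0 n 1).foldl (fun s j =>
      s + PySem.List.pyGetD row j 0 * PySem.List.pyGetD v j 0) s
    PySem.List.pySetD result i (PySem.Int.mod s mod)) result

-- ===== PORT B =====
-- combine(lo, hi): the partial result vector over columns [lo, hi).
-- The 'if h : …' guard only makes the recursion total; Python's combine is never
-- called with hi - lo ≤ 0 (there it would recurse forever), B calls it with lo < hi.
def pyCombine (A : List (List Int)) (v : List Int) (n : Int) (lo hi : Int) : List Int :=
  if hi - lo = 1 then
    let vj := PySem.List.pyGetD v lo 0
    (PySem.List.pyRange 0 n 1).map (fun i =>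
      PySem.List.pyGetD (PySem.List.pyGetD A i []) lo 0 * vj)
  else
    let mid := PySem.Int.floordiv (lo + hi) 2
    if _h : lo < mid ∧ mid < hi then
      let left := pyCombine A v n lo mid
      let right := pyCombine A v n mid hi
      List.zipWith (fun x y => x + y) left right
    else []
termination_by (hi - lo).toNat
decreasing_by all_goals omega

def mat_vec_mod_alt (A : List (List Int)) (v : List Int) (mod : Int) : List Int :=
  let n : Int := v.length
  if n = 0 then []
  else (pyCombine A v n 0 n).map (fun s => PySem.Int.mod s mod)

-- ===== PRECONDITION & SPEC =====
-- Pre_ excludes exactly the inputs where the Python A raises: IndexError when A (or one of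
-- its first n rows) is shorter than n = len(v), and ZeroDivisionError when mod = 0 and n > 0.
def Pre_mat_vec_mod (A : List (List Int)) (v : List Int) (mod : Int) : Prop :=
  v.length ≤ A.length ∧ (∀ row ∈ A.take v.length, v.length ≤ row.length) ∧ (v = [] ∨ mod ≠ 0)
instance (A : List (List Int)) (v : List Int) (mod : Int) : Decidable (Pre_mat_vec_mod A v mod) := by
  unfold Pre_mat_vec_mod; infer_instance
def pvWitness_mat_vec_mod : List (List Int) × List Int × Int := ([[1, 2], [3, 4]], [5, 6], 7)
def Spec_mat_vec_mod (A : List (List Int)) (v : List Int) (mod : Int) (out : List Int) : Prop := out = mat_vec_mod_alt A v mod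
instance (A : List (List Int)) (v : List Int) (mod : Int) (out : List Int) : Decidable (Spec_mat_vec_mod A v mod out) := by unfold Spec_mat_vec_mod; infer_instance

-- ===== CLAIM (what is proved, stated in full; the proofs are below) =====
def Claim_equal_mat_vec_mod : Prop := ∀ (A : List (List Int)) (v : List Int) (mod : Int), Dom_mat_vec_mod A v mod → Pre_mat_vec_mod A v mod → Spec_mat_vec_mod A v mod (mat_vec_mod A v mod)

-- ===== LEMMAS AND PROOFS =====

-- A's in-place pass: r[i] := F i r[i] for i in range m.
theorem foldl_set_upd (F : Nat → Int → Int) (r0 : List Int) (m : Nat) (h : m ≤ r0.length) :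
    (List.range m).foldl (fun r i => r.set i (F i (r.getD i 0))) r0
      = ((List.range m).map (fun i => F i (r0.getD i 0))) ++ r0.drop m := by
  induction m with
  | zero => simp
  | succ m ih =>
    have hm : m < r0.length := h
    rw [List.range_succ, List.foldl_append, List.map_append, ih (Nat.le_of_lt hm)]
    simp only [List.foldl_cons, List.foldl_nil]
    have hlen : ((List.range m).map (fun i => F i (r0.getD i 0))).length = m := by simp
    have hdrop : r0.drop m = r0[m] :: r0.drop (m + 1) := List.drop_eq_getElem_cons hm
    rw [hdrop]
    rw [List.getD_eq_getElem?_getD, List.getElem?_append_right (by omega)]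
    rw [List.set_append]
    simp [List.getD_eq_getElem?_getD]
    rw [hdrop]
    rfl

-- A left fold of additions is a Finset.range sum.
theorem foldl_add_eq_sum (f : Nat → Int) (n : Nat) :
    (List.range n).foldl (fun s j => s + f j) 0 = ∑ j ∈ Finset.range n, f j := by
  induction n with
  | zero => simp
  | succ n ih => rw [List.range_succ, List.foldl_append, ih, Finset.sum_range_succ]; simp

theorem zipWith_add_map (g h : Nat → Int) (l : List Nat) :
    List.zipWith (fun x y => x + y) (l.map g) (l.map h) = l.map (fun i => g i + h i) := by
  induction l with
  | nil => rfl
  | cons a l ih => simp [ih]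

-- pyCombine computes, entrywise, the column sums over [lo, hi).
theorem pyCombine_spec (A : List (List Int)) (v : List Int) (lo hi : Nat) (hlt : lo < hi) :
    pyCombine A v (v.length : Int) (lo : Int) (hi : Int)
      = (List.range v.length).map (fun i =>
          ∑ j ∈ Finset.Ico lo hi, (A.getD i []).getD j 0 * v.getD j 0) := by
  induction hfuel : hi - lo using Nat.strong_induction_on generalizing lo hi with
  | _ d ih =>
  rw [pyCombine]
  by_cases h1 : hi = lo + 1
  · subst h1
    rw [if_pos (by push_cast; ring)]
    rw [PySem.List.pyRange_zero_nat, List.map_map]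
    apply List.map_congr_left
    intro i _
    simp
  · have h2 : lo + 2 ≤ hi := by omega
    rw [if_neg (by omega)]
    have hmid : PySem.Int.floordiv ((lo : Int) + (hi : Int)) 2 = (((lo + hi) / 2 : Nat) : Int) := by
      rw [show ((lo : Int) + (hi : Int)) = (((lo + hi : Nat)) : Int) by push_cast; ring]
      exact_mod_cast PySem.Int.floordiv_natCast (lo + hi) 2
    set m : Nat := (lo + hi) / 2 with hm
    have hlom : lo < m := by omega
    have hmhi : m < hi := by omega
    rw [hmid, dif_pos (by constructor <;> exact_mod_cast by omega)]
    rw [ih (m - lo) (by omega) lo m hlom rfl, ih (hi - m) (by omega) m hi hmhi rfl]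
    rw [zipWith_add_map]
    apply List.map_congr_left
    intro i _
    exact Finset.sum_Ico_consecutive _ (le_of_lt hlom) (le_of_lt hmhi)

-- Port A, normalized to a Nat-indexed fold.
theorem matA_eq (A : List (List Int)) (v : List Int) (mod : Int) :
    mat_vec_mod A v mod
      = (List.range v.length).foldl (fun r i =>
          r.set i (PySem.Int.mod
            ((List.range v.length).foldl
              (fun s j => s + (A.getD i []).getD j 0 * v.getD j 0) 0) mod))
          (List.replicate v.length 0) := by
  unfold mat_vec_mod
  simp only [PySem.List.pyRange_zero_nat, List.foldl_map, PySem.List.pyGetD_natCast,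
    PySem.List.pySetD_natCast]

-- ===== VERDICT (by name: the statement is the Claim_ definition above) =====
theorem mat_vec_mod_spec : Claim_equal_mat_vec_mod := by
  intro A v mod _ _
  unfold Spec_mat_vec_mod mat_vec_mod_alt
  rw [matA_eq]
  rcases Nat.eq_zero_or_pos v.length with hz | hpos
  · simp [hz]
  · rw [if_neg (by exact_mod_cast Nat.pos_iff_ne_zero.mp hpos)]
    have hC := pyCombine_spec A v 0 v.length hpos
    simp only [Nat.cast_zero] at hC
    rw [hC, List.map_map]
    have hA := foldl_set_upd
      (fun i _ => PySem.Int.mod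
        ((List.range v.length).foldl (fun s j => s + (A.getD i []).getD j 0 * v.getD j 0) 0) mod)
      (List.replicate v.length 0) v.length (by simp)
    simp only [] at hA
    rw [hA]
    simp only [List.drop_replicate, Nat.sub_self, List.replicate_zero, List.append_nil]
    apply List.map_congr_left
    intro i _
    simp only [Function.comp]
    rw [foldl_add_eq_sum, Finset.range_eq_Ico]
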